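-- pv_equiv track=rewrite | github.com/fangzhouwang/-CADisCMOSExplorer | size_lib.py | gen_sizes
-- ===== SOURCE A (Python) =====
-- import itertools
--
-- def gen_size_desc(tx_cnt, sizing_options):
--     return itertools.product(sizing_options, repeat=tx_cnt)
--
-- def gen_sizes(tx_cnt, sizing_options):
--     for size_desc in gen_size_desc(tx_cnt, sizing_options):
--         str_size_desc = ''
--         area = 0
--         for size in size_desc:
--             str_size_desc += str(size)
--             area += int(size)
--         yield str_size_desc, area
-- ===== SOURCE B (Python) =====
-- def gen_sizes(tx_cnt, sizing_options):
--     # recursive generator building each combination incrementally (prefix string + running sum)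
--     if tx_cnt < 0:
--         raise ValueError("repeat argument cannot be negative")
--     opts = list(sizing_options)
--
--     def rec(depth, prefix, area):
--         if depth == 0:
--             yield prefix, area
--         else:
--             for o in opts:
--                 yield from rec(depth - 1, prefix + str(o), area + int(o))
--
--     yield from rec(tx_cnt, '', 0)
-- ===== Notes on version B (the rewrite author's own statement) =====
-- stated objective: alternative
-- what changed: B replaces itertools.product plus a per-tuple rescan loop with a recursive generator that carries the accumulated prefix string and running area sum, never materializing the tuples.
import Mathlib
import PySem

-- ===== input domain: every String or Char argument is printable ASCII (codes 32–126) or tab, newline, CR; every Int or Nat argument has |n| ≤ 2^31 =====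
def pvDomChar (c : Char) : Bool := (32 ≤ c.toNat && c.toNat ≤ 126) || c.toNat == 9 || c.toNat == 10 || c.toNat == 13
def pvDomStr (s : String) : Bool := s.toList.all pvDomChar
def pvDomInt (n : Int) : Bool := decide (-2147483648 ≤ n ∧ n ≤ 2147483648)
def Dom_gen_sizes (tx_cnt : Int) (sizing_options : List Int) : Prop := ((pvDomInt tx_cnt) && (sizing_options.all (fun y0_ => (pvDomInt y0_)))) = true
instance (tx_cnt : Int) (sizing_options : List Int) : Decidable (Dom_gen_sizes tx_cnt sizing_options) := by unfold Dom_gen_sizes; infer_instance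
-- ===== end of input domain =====

-- B replaces itertools.product + per-tuple rescan with a recursive enumeration carrying the prefix string and running sum (alternative decomposition, same cost).


-- ===== PORT A =====
-- itertools.product(sizing_options, repeat=tx_cnt), leftmost position outermost
def pvProdA (opts : List Int) : Nat → List (List Int)
  | 0 => [[]]
  | n + 1 => opts.flatMap (fun x => (pvProdA opts n).map (fun t => x :: t))

-- inner loop of A: two accumulators str_size_desc, area over one tuple
def pvTupleA (t : List Int) : String × Int :=
  t.foldl (fun p x => (p.1 ++ PySem.Int.toStr x, p.2 + x)) ("", 0)

def gen_sizes (tx_cnt : Int) (sizing_options : List Int) : List (String × Int) :=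
  (pvProdA sizing_options tx_cnt.toNat).map pvTupleA

-- ===== PORT B =====
-- recursion over positions carrying the accumulated prefix string and running area sum
def pvRecB (opts : List Int) : Nat → String → Int → List (String × Int)
  | 0, pre, area => [(pre, area)]
  | n + 1, pre, area =>
      opts.flatMap (fun o => pvRecB opts n (pre ++ PySem.Int.toStr o) (area + o))

def gen_sizes_alt (tx_cnt : Int) (sizing_options : List Int) : List (String × Int) :=
  pvRecB sizing_options tx_cnt.toNat "" 0

-- ===== PRECONDITION & SPEC =====
-- Python's itertools.product raises ValueError for a negative repeat count, so negative tx_cnt is excluded.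
def Pre_gen_sizes (tx_cnt : Int) (sizing_options : List Int) : Prop := 0 ≤ tx_cnt
instance (tx_cnt : Int) (sizing_options : List Int) : Decidable (Pre_gen_sizes tx_cnt sizing_options) := by unfold Pre_gen_sizes; infer_instance
def pvWitness_gen_sizes : Int × List Int := (2, [1, 2])

def Spec_gen_sizes (tx_cnt : Int) (sizing_options : List Int) (out : List (String × Int)) : Prop := out = gen_sizes_alt tx_cnt sizing_options
instance (tx_cnt : Int) (sizing_options : List Int) (out : List (String × Int)) : Decidable (Spec_gen_sizes tx_cnt sizing_options out) := by unfold Spec_gen_sizes; infer_instance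

-- ===== CLAIM (what is proved, stated in full; the proofs are below) =====
def Claim_equal_gen_sizes : Prop := ∀ (tx_cnt : Int) (sizing_options : List Int), Dom_gen_sizes tx_cnt sizing_options → Pre_gen_sizes tx_cnt sizing_options → Spec_gen_sizes tx_cnt sizing_options (gen_sizes tx_cnt sizing_options)

-- ===== LEMMAS AND PROOFS =====
-- invariant: mapping A's per-tuple fold (started from an arbitrary prefix/area) over the
-- product list equals B's incremental recursion with that prefix/area
theorem pv_main (opts : List Int) (n : Nat) :
    ∀ (pre : String) (area : Int),
      (pvProdA opts n).map
        (fun t => t.foldl (fun p x => (p.1 ++ PySem.Int.toStr x, p.2 + x)) (pre, area))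
        = pvRecB opts n pre area := by
  induction n with
  | zero => intro pre area; simp [pvProdA, pvRecB]
  | succ n ih =>
      intro pre area
      simp only [pvProdA, pvRecB, List.map_flatMap, List.map_map]
      refine List.flatMap_congr (fun o _ => ?_)
      simpa [Function.comp, List.foldl_cons] using ih (pre ++ PySem.Int.toStr o) (area + o)

-- ===== VERDICT (by name: the statement is the Claim_ definition above) =====
theorem gen_sizes_spec : Claim_equal_gen_sizes := by
  intro tx_cnt sizing_options _ _
  show gen_sizes tx_cnt sizing_options = gen_sizes_alt tx_cnt sizing_options
  simpa [gen_sizes, gen_sizes_alt, pvTupleA] using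
    pv_main sizing_options tx_cnt.toNat "" 0
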